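-- pv_equiv track=rewrite | github.com/yasabh/elte-comsec | w5-encryption-by-changing-key/main.py | encrypt_xor_with_changing_key_by_prev_cipher
-- ===== SOURCE A (Python) =====
-- def encrypt_xor_with_changing_key_by_prev_cipher(string, key, action = 'encrypt'):
--     '''
--     >>> encrypt_xor_with_changing_key_by_prev_cipher('Hello',123,'encrypt')
--     '3V:V9'
--     >>> encrypt_xor_with_changing_key_by_prev_cipher(encrypt_xor_with_changing_key_by_prev_cipher('Hello',123,'encrypt'),123,'decrypt')
--     'Hello'
--     >>> encrypt_xor_with_changing_key_by_prev_cipher(encrypt_xor_with_changing_key_by_prev_cipher('Cryptography',10,'encrypt'),10,'decrypt')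
--     'Cryptography'
--     '''
--     processedStr = []
--
--     if action == 'encrypt':
--         for c in string:
--             key = ord(c) ^ key
--             processedStr.append(chr(key))
--     elif action == 'decrypt':
--         revStr = ''.join(reversed(string))
--         for i in range(0, len(string)):
--             dec = (key if (i >= (len(string) - 1)) else ord(revStr[1 + i])) ^ ord(revStr[i])
--             processedStr.append(chr(dec))
--         processedStr = ''.join(reversed(processedStr))
--     else:
--         return 'Wrong action'
--
--     return ''.join(processedStr)
-- ===== SOURCE B (Python) =====
-- def encrypt_xor_with_changing_key_by_prev_cipher(string, key, action = 'encrypt'):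
--     if action == 'encrypt':
--         # prefix-XOR formulation: cipher[i] = key ^ (ord(s[0]) ^ ... ^ ord(s[i]))
--         acc = 0
--         pres = []
--         for c in string:
--             acc ^= ord(c)
--             pres.append(acc)
--         return ''.join(chr(key ^ p) for p in pres)
--     if action == 'decrypt':
--         # pair each cipher byte with its predecessor (key in front) and XOR pointwise
--         ords = [ord(c) for c in string]
--         return ''.join(chr(c ^ p) for c, p in zip(ords, [key] + ords))
--     return 'Wrong action'
-- ===== Notes on version B (the rewrite author's own statement) =====
-- stated objective: alternative
-- what changed: Encrypt is recast as a prefix-XOR scan of the character codes followed by one map XORing the constant key (instead of a fold threading a mutating key), and decrypt pairs the ciphertext with itself shifted one position (key in front) via zip instead of A's reverse/indexed-loop/reverse.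
-- outside the precondition, e.g. on encrypt_xor_with_changing_key_by_prev_cipher('A', 1114112, 'encrypt'): A raises ValueError, B raises ValueError
import Mathlib
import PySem

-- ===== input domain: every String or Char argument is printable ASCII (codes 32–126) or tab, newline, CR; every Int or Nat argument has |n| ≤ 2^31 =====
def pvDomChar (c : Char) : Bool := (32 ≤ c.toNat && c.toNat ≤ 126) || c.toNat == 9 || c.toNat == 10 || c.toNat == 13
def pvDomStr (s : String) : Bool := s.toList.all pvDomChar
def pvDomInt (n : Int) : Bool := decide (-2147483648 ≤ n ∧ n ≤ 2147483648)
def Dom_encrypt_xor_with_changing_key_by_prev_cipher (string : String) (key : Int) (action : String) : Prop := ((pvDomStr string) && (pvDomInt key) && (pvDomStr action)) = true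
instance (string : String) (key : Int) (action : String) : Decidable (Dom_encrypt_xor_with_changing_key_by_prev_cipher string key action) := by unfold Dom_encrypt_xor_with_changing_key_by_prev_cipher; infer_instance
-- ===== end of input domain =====

-- B recasts encrypt as a prefix-XOR scan plus one constant-key map and decrypt as a pointwise
-- XOR of the ciphertext zipped with itself shifted one position (objective: alternative).


-- ===== PORT A =====
-- ord(c) / chr(n) (exact for 0 ≤ n < 0x110000 and non-surrogate n, which Pre_ guarantees)
def pvOrd (c : Char) : Int := Int.ofNat c.toNat
def pvChr (n : Int) : Char := Char.ofNat n.toNat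

-- the encrypt loop: state is (key, processedStr)
def pvAEnc (s : List Char) (st : Int × List Char) : Int × List Char :=
  s.foldl (fun st c =>
    let k := PySem.Int.bxor (pvOrd c) st.1
    (k, st.2 ++ [pvChr k])) st

-- the decrypt loop over range(0, len(string)); indices are always in range, getD transcribes revStr[i]
def pvADec (rev : List Char) (n : Nat) (key : Int) : List Char :=
  (List.range n).foldl (fun acc i =>
    let dec := PySem.Int.bxor
      (if i ≥ n - 1 then key else pvOrd (rev.getD (1 + i) default))
      (pvOrd (rev.getD i default))
    acc ++ [pvChr dec]) []

def encrypt_xor_with_changing_key_by_prev_cipher (string : String) (key : Int) (action : String) : String :=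
  if action = "encrypt" then
    String.ofList (pvAEnc string.toList (key, [])).2
  else if action = "decrypt" then
    String.ofList (pvADec string.toList.reverse string.toList.length key).reverse
  else
    "Wrong action"

-- ===== PORT B =====
-- the prefix-XOR scan of the character codes (Source B's first decrypt-free loop: acc ^= ord(c); pres.append(acc))
def pvPre (s : List Char) (acc : Int) : List Int :=
  match s with
  | [] => []
  | c :: r =>
    let a := PySem.Int.bxor acc (pvOrd c)
    a :: pvPre r a

def encrypt_xor_with_changing_key_by_prev_cipher_alt (string : String) (key : Int) (action : String) : String :=
  if action = "encrypt" then
    String.ofList ((pvPre string.toList 0).map (fun p => pvChr (PySem.Int.bxor key p)))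
  else if action = "decrypt" then
    let ords := string.toList.map pvOrd
    String.ofList (List.zipWith (fun c p => pvChr (PySem.Int.bxor c p)) ords (key :: ords))
  else
    "Wrong action"

-- ===== PRECONDITION & SPEC =====
-- Pre_ (for encrypt/decrypt on a nonempty string) excludes key < 0 and key > 0x10FFFF, where A's
-- chr raises ValueError, and the 2048 keys of the surrogate block [0xD800, 0xDFFF], where A returns
-- a lone-surrogate string that Lean's String type cannot hold (Char excludes surrogate code points);
-- B returns the identical Python value on that block.
def Pre_encrypt_xor_with_changing_key_by_prev_cipher (string : String) (key : Int) (action : String) : Prop :=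
  (action = "encrypt" ∨ action = "decrypt") → string ≠ "" →
    (0 ≤ key ∧ key ≤ 1114111 ∧ ¬ (55296 ≤ key ∧ key ≤ 57343))
instance (string : String) (key : Int) (action : String) : Decidable (Pre_encrypt_xor_with_changing_key_by_prev_cipher string key action) := by unfold Pre_encrypt_xor_with_changing_key_by_prev_cipher; infer_instance
def pvWitness_encrypt_xor_with_changing_key_by_prev_cipher : String × Int × String := ("Hello", 123, "encrypt")

def Spec_encrypt_xor_with_changing_key_by_prev_cipher (string : String) (key : Int) (action : String) (out : String) : Prop := out = encrypt_xor_with_changing_key_by_prev_cipher_alt string key action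
instance (string : String) (key : Int) (action : String) (out : String) : Decidable (Spec_encrypt_xor_with_changing_key_by_prev_cipher string key action out) := by unfold Spec_encrypt_xor_with_changing_key_by_prev_cipher; infer_instance

-- ===== CLAIM (what is proved, stated in full; the proofs are below) =====
def Claim_equal_encrypt_xor_with_changing_key_by_prev_cipher : Prop := ∀ (string : String) (key : Int) (action : String), Dom_encrypt_xor_with_changing_key_by_prev_cipher string key action → Pre_encrypt_xor_with_changing_key_by_prev_cipher string key action → Spec_encrypt_xor_with_changing_key_by_prev_cipher string key action (encrypt_xor_with_changing_key_by_prev_cipher string key action)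

-- ===== LEMMAS AND PROOFS =====

-- XOR cancellation on Nat used by the encrypt invariant
theorem pvXor4 (k a o : Nat) : (k ^^^ a) ^^^ (a ^^^ o) = k ^^^ o := by
  rw [Nat.xor_assoc, ← Nat.xor_assoc a a o, Nat.xor_self, Nat.zero_xor]

-- encrypt invariant: A's fold from running key k equals the prefix scan from a mapped with the
-- invariant combined key k ^^^ a
theorem pvEncMain (s : List Char) (k a : Nat) (acc : List Char) :
    (pvAEnc s (((k : Nat) : Int), acc)).2
      = acc ++ (pvPre s ((a : Nat) : Int)).map
          (fun p => pvChr (PySem.Int.bxor (((k ^^^ a : Nat) : Int)) p)) := by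
  induction s generalizing k a acc with
  | nil => simp [pvAEnc, pvPre]
  | cons c rest ih =>
    have ho : pvOrd c = ((c.toNat : Nat) : Int) := rfl
    simp only [pvAEnc, List.foldl_cons, pvPre, List.map_cons, ho, PySem.Int.bxor_natCast]
    have hA := ih (c.toNat ^^^ k) (a ^^^ c.toNat) (acc ++ [pvChr ((c.toNat ^^^ k : Nat) : Int)])
    simp only [pvAEnc] at hA
    rw [hA]
    have h1 : (c.toNat ^^^ k) ^^^ (a ^^^ c.toNat) = k ^^^ a := by
      rw [Nat.xor_comm c.toNat k, Nat.xor_comm a c.toNat, pvXor4]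
    have h2 : (k ^^^ a) ^^^ (a ^^^ c.toNat) = c.toNat ^^^ k := by
      rw [pvXor4, Nat.xor_comm]
    simp [h1, h2]

-- B's decrypt pass written as the natural head recursion (proof-only bridge)
def pvDecRec (s : List Char) (prev : Int) : List Char :=
  match s with
  | [] => []
  | c :: rest => pvChr (PySem.Int.bxor (pvOrd c) prev) :: pvDecRec rest (pvOrd c)

-- B's zip of the ciphertext with its one-shifted self is that recursion
theorem pvZip_eq_rec (s : List Char) (prev : Int) :
    List.zipWith (fun c p => pvChr (PySem.Int.bxor c p)) (s.map pvOrd) (prev :: s.map pvOrd)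
      = pvDecRec s prev := by
  induction s generalizing prev with
  | nil => rfl
  | cons c rest ih => simp [pvDecRec, ← ih (pvOrd c)]

-- append-fold as a map
theorem foldl_append_map {α β : Type} (f : α → β) (l : List α) (acc : List β) :
    l.foldl (fun acc x => acc ++ [f x]) acc = acc ++ l.map f := by
  induction l generalizing acc with
  | nil => simp
  | cons x rest ih => simp [ih]

-- the recursion, indexed
theorem pvDecRec_eq_map (s : List Char) (prev : Int) :
    pvDecRec s prev = (List.range s.length).map (fun j =>
      pvChr (PySem.Int.bxor (pvOrd (s.getD j default))
        (if j = 0 then prev else pvOrd (s.getD (j - 1) default)))) := by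
  induction s generalizing prev with
  | nil => rfl
  | cons c rest ih =>
    simp only [pvDecRec, List.length_cons, List.range_succ_eq_map, List.map_cons, List.map_map]
    refine congrArg₂ _ (by simp) ?_
    rw [ih (pvOrd c)]
    apply List.map_congr_left
    intro j hj
    rcases j with _ | j <;> simp

theorem map_range_reverse {b : Type} (f : Nat → b) (n : Nat) :
    ((List.range n).map f).reverse = (List.range n).map (fun j => f (n - 1 - j)) := by
  apply List.ext_getElem (by simp)
  intro j h1 h2
  simp only [List.getElem_reverse, List.getElem_map, List.getElem_range,
    List.length_map, List.length_range]

-- A's reversed, reverse-indexed decrypt loop, reversed back, is the forward recursion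
theorem pvDec_eq (s : List Char) (key : Int) :
    (pvADec s.reverse s.length key).reverse = pvDecRec s key := by
  rw [pvDecRec_eq_map]
  unfold pvADec
  rw [foldl_append_map, List.nil_append, map_range_reverse]
  apply List.map_congr_left
  intro j hj
  have hn : j < s.length := List.mem_range.mp hj
  have hget : ∀ i, i < s.length → s.reverse.getD i default = s.getD (s.length - 1 - i) default := by
    intro i hi
    rw [List.getD_eq_getElem _ _ (by simp; omega), List.getD_eq_getElem _ _ (by omega),
      List.getElem_reverse]
  rcases Nat.eq_zero_or_pos j with hj0 | hj0
  · subst hj0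
    have e1 : s.length - 1 - 0 ≥ s.length - 1 := by omega
    rw [if_pos e1, if_pos rfl, hget _ (by omega)]
    have e2 : s.length - 1 - (s.length - 1 - 0) = 0 := by omega
    rw [e2, PySem.Int.bxor_comm]
  · have e1 : ¬ (s.length - 1 - j ≥ s.length - 1) := by omega
    have e2 : ¬ (j = 0) := by omega
    rw [if_neg e1, if_neg e2, hget _ (by omega), hget _ (by omega)]
    have e3 : s.length - 1 - (1 + (s.length - 1 - j)) = j - 1 := by omega
    have e4 : s.length - 1 - (s.length - 1 - j) = j := by omega
    rw [e3, e4, PySem.Int.bxor_comm]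

-- ===== VERDICT (by name: the statement is the Claim_ definition above) =====
theorem encrypt_xor_with_changing_key_by_prev_cipher_spec : Claim_equal_encrypt_xor_with_changing_key_by_prev_cipher := by
  intro string key action _ hpre
  unfold Spec_encrypt_xor_with_changing_key_by_prev_cipher
  unfold encrypt_xor_with_changing_key_by_prev_cipher encrypt_xor_with_changing_key_by_prev_cipher_alt
  by_cases h1 : action = "encrypt"
  · rw [if_pos h1, if_pos h1]
    by_cases hs : string = ""
    · subst hs; rfl
    · obtain ⟨hk0, -, -⟩ := hpre (Or.inl h1) hs
      have hk : key = ((key.toNat : Nat) : Int) := (Int.toNat_of_nonneg hk0).symm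
      rw [hk]
      have := pvEncMain string.toList key.toNat 0 []
      simp only [Nat.cast_zero, Nat.xor_zero, List.nil_append] at this
      rw [this]
  · by_cases h2 : action = "decrypt"
    · rw [if_neg h1, if_pos h2, if_neg h1, if_pos h2]
      show _ = String.ofList (List.zipWith (fun c p => pvChr (PySem.Int.bxor c p)) (string.toList.map pvOrd) (key :: string.toList.map pvOrd))
      rw [pvDec_eq string.toList key, pvZip_eq_rec string.toList key]
    · simp [h1, h2]
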